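-- pv_equiv track=rewrite | github.com/posl/comment_recommendation | script/split_gen/4_time/en/238_C/7.py | f
-- ===== SOURCE A (Python) =====
-- def f(n):
--   if n==0:
--     return 0
--   elif n<10:
--     return n
--   else:
--     dig=len(str(n))
--     return ((n-10**(dig-1)+1)*dig+f(10**(dig-1)-1))%998244353
-- ===== SOURCE B (Python) =====
-- def f(n):
--     # closed form for the total digit count of 1..n, one mod at the end
--     if n < 10:
--         return n
--     L = len(str(n))
--     return ((n + 1) * L - (10 ** L - 1) // 9) % 998244353
-- ===== Notes on version B (the rewrite author's own statement) =====
-- stated objective: simpler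
-- what changed: Replaces A's per-digit-length recursion (which applies the modulus at every level) by the one-shot closed form (n+1)*L minus the L-digit repunit taken modulo the same prime, keeping the single-digit base case that also covers negatives.
import Mathlib
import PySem

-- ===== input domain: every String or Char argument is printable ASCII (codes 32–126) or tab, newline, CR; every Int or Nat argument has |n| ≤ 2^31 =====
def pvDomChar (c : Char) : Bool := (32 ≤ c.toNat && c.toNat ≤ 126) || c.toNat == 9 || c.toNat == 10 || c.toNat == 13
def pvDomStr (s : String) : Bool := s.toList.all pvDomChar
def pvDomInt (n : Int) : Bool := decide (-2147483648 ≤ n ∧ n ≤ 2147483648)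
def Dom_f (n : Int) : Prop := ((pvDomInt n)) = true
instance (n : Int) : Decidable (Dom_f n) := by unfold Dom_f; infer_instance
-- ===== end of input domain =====

-- B replaces A's per-digit-length recursion by a one-shot closed form, (n+1)*L minus the L-digit repunit, modulo the same prime (simpler).

-- length of str(n) for positive n (used by the ports' termination / the proofs)
theorem pv_toDigitsCore_len : ∀ (fu : Nat), ∀ (n : Nat) (l : List Char), n < fu →
    (Nat.toDigitsCore 10 fu n l).length = l.length + Nat.log 10 n + 1 := by
  intro fu
  induction fu with
  | zero => intro n l h; omega
  | succ fu ih =>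
    intro n l h
    simp only [Nat.toDigitsCore]
    by_cases h10 : n / 10 = 0
    · have hn : n < 10 := by omega
      simp [h10, Nat.log_eq_zero_iff, hn]
    · have hn : 10 ≤ n := by omega
      rw [if_neg h10, ih (n / 10) _ (by omega)]
      rw [Nat.log_div_base]
      have := Nat.log_pos (b := 10) (by norm_num) hn
      simp
      omega

theorem pv_toStr_len (n : Int) (h : 0 < n) :
    PySem.Str.len (PySem.Int.toStr n) = (Nat.log 10 n.toNat : Int) + 1 := by
  simp only [PySem.Str.len, PySem.Int.toList_toStr, PySem.Int.toChars, if_neg (by omega : ¬ n < 0),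
    Nat.toDigits]
  rw [pv_toDigitsCore_len (n.toNat + 1) n.toNat [] (by omega)]
  simp

-- ===== PORT A =====
-- Python '10**(dig-1)' with dig ≥ 2 in this branch: ported as 10 ^ (dig-1).toNat (exact, exponent nonneg)
def f (n : Int) : Int :=
  if n = 0 then 0
  else if n < 10 then n
  else
    let dig : Int := PySem.Str.len (PySem.Int.toStr n)
    PySem.Int.mod ((n - 10 ^ (dig - 1).toNat + 1) * dig + f (10 ^ (dig - 1).toNat - 1)) 998244353
termination_by n.toNat
decreasing_by
  have h1 : (0:Int) < n := by omega
  rw [pv_toStr_len n h1]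
  have hlog := Nat.pow_log_le_self 10 (x := n.toNat) (by omega)
  have he : ((Nat.log 10 n.toNat : Int) + 1 - 1).toNat = Nat.log 10 n.toNat := by omega
  rw [he]
  have hc : (10:Int) ^ Nat.log 10 n.toNat = ((10 ^ Nat.log 10 n.toNat : Nat) : Int) := by push_cast; ring
  omega

-- ===== PORT B =====
-- Python '10**L' with L ≥ 2 in this branch: ported as 10 ^ L.toNat (exact, exponent nonneg)
def f_alt (n : Int) : Int :=
  if n < 10 then n
  else
    let L : Int := PySem.Str.len (PySem.Int.toStr n)
    PySem.Int.mod ((n + 1) * L - PySem.Int.floordiv (10 ^ L.toNat - 1) 9) 998244353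

-- ===== PRECONDITION & SPEC =====
def Spec_f (n : Int) (out : Int) : Prop := out = f_alt n
instance (n : Int) (out : Int) : Decidable (Spec_f n out) := by unfold Spec_f; infer_instance

-- ===== CLAIM (what is proved, stated in full; the proofs are below) =====
def Claim_equal_f : Prop := ∀ (n : Int), Dom_f n → Spec_f n (f n)

-- ===== LEMMAS AND PROOFS =====

-- repunit: r k = (10^k - 1)/9 exactly
def pvRep (k : Nat) : Int := ∑ i ∈ Finset.range k, 10 ^ i

theorem pvRep_mul : ∀ (k : Nat), 9 * pvRep k = 10 ^ k - 1 := by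
  intro k
  induction k with
  | zero => simp [pvRep]
  | succ k ih =>
    simp only [pvRep, Finset.sum_range_succ] at *
    rw [mul_add, ih]
    ring

theorem pv_fdiv_rep (k : Nat) : PySem.Int.floordiv (10 ^ k - 1) 9 = pvRep k := by
  show Int.fdiv _ _ = _
  rw [← pvRep_mul k, Int.mul_fdiv_cancel_left _ (by norm_num)]

theorem pv_fmod_pos (a b : Int) (hb : 0 < b) : PySem.Int.mod a b = a % b := by
  show Int.fmod a b = _
  rw [Int.fmod_eq_emod, if_pos (Or.inl hb.le)]
  ring

-- f_alt at 10^k - 1 in unified form (k ≥ 1)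
theorem pv_alt_pow (k : Nat) (hk : 1 ≤ k) :
    f_alt (10 ^ k - 1) = PySem.Int.mod (10 ^ k * k - pvRep k) 998244353 := by
  rcases Nat.lt_or_ge k 2 with h2 | h2
  · interval_cases k
    decide
  · have h100 : (100:Int) ≤ 10 ^ k := by
      calc (100:Int) = 10 ^ 2 := by norm_num
        _ ≤ 10 ^ k := pow_le_pow_right₀ (by norm_num) h2
    have hge : ¬ ((10:Int) ^ k - 1 < 10) := by omega
    have hpos : (0:Int) < 10 ^ k - 1 := by omega
    have htn : ((10:Int) ^ k - 1).toNat = 10 ^ k - 1 := by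
      have hc : (10:Int) ^ k = ((10 ^ k : Nat) : Int) := by push_cast; ring
      omega
    have hlog : Nat.log 10 ((10:Int) ^ k - 1).toNat = k - 1 := by
      rw [htn]
      refine Nat.log_eq_of_pow_le_of_lt_pow ?_ ?_
      · have h1 : 10 ^ (k - 1) * 10 ≤ 10 ^ k := by
          rw [← pow_succ]
          exact Nat.pow_le_pow_right (by norm_num) (by omega)
        have h0 : 1 ≤ 10 ^ (k-1) := Nat.one_le_pow _ _ (by norm_num)
        omega
      · have hkk : k - 1 + 1 = k := by omega
        rw [hkk]
        omega
    rw [f_alt, if_neg hge, pv_toStr_len _ hpos, hlog]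
    show PySem.Int.mod ((10 ^ k - 1 + 1) * (((k - 1 : Nat) : Int) + 1) -
        PySem.Int.floordiv (10 ^ (((k - 1 : Nat) : Int) + 1).toNat - 1) 9) 998244353 = _
    have hLt : (((k - 1 : Nat) : Int) + 1).toNat = k := by omega
    rw [hLt, pv_fdiv_rep]
    congr 1
    push_cast [Nat.cast_sub hk]
    ring

theorem pv_main : ∀ (m : Nat) (n : Int), n.toNat ≤ m → f n = f_alt n := by
  intro m
  induction m with
  | zero =>
    intro n hn
    have hlt : n < 10 := by omega
    rw [f, f_alt, if_pos hlt]
    split_ifs with h0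
    · omega
    · rfl
  | succ m ih =>
    intro n hn
    by_cases hlt : n < 10
    · rw [f, f_alt, if_pos hlt]
      split_ifs with h0
      · omega
      · rfl
    · have hpos : (0:Int) < n := by omega
      rw [f, f_alt, if_neg (by omega : ¬ n = 0), if_neg hlt, if_neg hlt]
      set k := Nat.log 10 n.toNat with hk
      have hk1 : 1 ≤ k := Nat.log_pos (by norm_num) (by omega)
      have hlen : PySem.Str.len (PySem.Int.toStr n) = (k : Int) + 1 := pv_toStr_len n hpos
      rw [hlen]
      show PySem.Int.mod ((n - 10 ^ ((k:Int) + 1 - 1).toNat + 1) * ((k:Int) + 1) +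
          f (10 ^ ((k:Int) + 1 - 1).toNat - 1)) 998244353 =
        PySem.Int.mod ((n + 1) * ((k:Int) + 1) - PySem.Int.floordiv (10 ^ ((k:Int) + 1).toNat - 1) 9) 998244353
      have ht1 : ((k : Int) + 1 - 1).toNat = k := by omega
      have ht2 : ((k : Int) + 1).toNat = k + 1 := by omega
      rw [ht1, ht2]
      -- the recursive argument is smaller
      have hpow_le : (10:Int) ^ k ≤ n := by
        have h := Nat.pow_log_le_self 10 (x := n.toNat) (by omega)
        rw [← hk] at h
        have hc : (10:Int) ^ k = ((10 ^ k : Nat) : Int) := by push_cast; ring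
        omega
      have hrec : f (10 ^ k - 1) = f_alt (10 ^ k - 1) := by
        apply ih
        have hc : (10:Int) ^ k = ((10 ^ k : Nat) : Int) := by push_cast; ring
        omega
      rw [hrec, pv_alt_pow k hk1]
      -- absorb the inner mod, then pure integer algebra
      have M : (0:Int) < 998244353 := by norm_num
      rw [pv_fmod_pos _ _ M, pv_fmod_pos _ _ M, pv_fmod_pos _ _ M, Int.add_emod_emod]
      congr 1
      have hr : pvRep (k + 1) = pvRep k + 10 ^ k := by
        simp [pvRep, Finset.sum_range_succ]
      rw [pv_fdiv_rep, hr]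
      ring

-- ===== VERDICT (by name: the statement is the Claim_ definition above) =====
theorem f_spec : Claim_equal_f := by
  intro n _
  show f n = f_alt n
  exact pv_main n.toNat n le_rfl
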